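-- pv_equiv track=rewrite | github.com/romainsacchi/power2x-dash | app.py | remove_common_items
-- ===== SOURCE A (Python) =====
-- def remove_common_items(labels):
--     words_list = [label.split(' | ') for label in labels]
--     if len(words_list) < 2:  # No intersection possible if fewer than 2 sets
--         return labels
--
--     common_words = set(words_list[0]).intersection(*words_list[1:])
--
--     cleaned_labels = []
--     for label in labels:
--         cleaned_label = ' | '.join([word for word in label.split(' | ') if word not in common_words]).strip(' | ')
--         cleaned_labels.append(cleaned_label)
--
--     cleaned_labels = [c.replace("|   |", "|") for c in cleaned_labels]
--     cleaned_labels = [c.replace("Yes | ", "") for c in cleaned_labels]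
--     cleaned_labels = [c.replace("No | ", "") for c in cleaned_labels]
--
--     return cleaned_labels
-- ===== SOURCE B (Python) =====
-- def remove_common_items(labels):
--     n = len(labels)
--     counts = {}
--     words_list = []
--     for label in labels:
--         words = label.split(' | ')
--         words_list.append(words)
--         for w in dict.fromkeys(words):
--             counts[w] = counts.get(w, 0) + 1
--     if n < 2:
--         return labels
--     out = []
--     for words in words_list:
--         c = ' | '.join(w for w in words if counts[w] < n).strip(' | ')
--         c = c.replace("|   |", "|").replace("Yes | ", "").replace("No | ", "")
--         out.append(c)
--     return out
-- ===== Notes on version B (the rewrite author's own statement) =====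
-- stated objective: alternative
-- what changed: B replaces A's N-way set intersection (plus a second splitting pass) by a single pass that splits each label once and builds a per-distinct-word count table; a word is common exactly when its count equals the number of labels, tested via count < n in the cleanup pass.
import Mathlib
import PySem

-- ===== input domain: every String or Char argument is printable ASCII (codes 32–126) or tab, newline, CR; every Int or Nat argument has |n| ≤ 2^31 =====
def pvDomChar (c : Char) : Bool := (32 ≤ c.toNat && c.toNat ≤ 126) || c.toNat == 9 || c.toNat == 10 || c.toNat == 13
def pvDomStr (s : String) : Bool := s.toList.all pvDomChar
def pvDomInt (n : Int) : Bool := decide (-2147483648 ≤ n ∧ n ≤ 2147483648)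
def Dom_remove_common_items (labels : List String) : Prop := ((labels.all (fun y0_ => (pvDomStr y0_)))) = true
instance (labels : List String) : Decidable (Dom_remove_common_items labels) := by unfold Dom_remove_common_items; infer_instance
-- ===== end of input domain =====

-- B replaces A's N-way set intersection by a one-pass count table over each label's distinct words (simpler single traversal, same result).

-- ===== PORT A =====
-- label.split(' | '): sep ≠ "", so split? always returns some — getD [] is exact
def pvSplit (label : String) : List String := (PySem.Str.split? label " | ").getD []

def remove_common_items (labels : List String) : List String :=
  let words_list := labels.map (fun label => pvSplit label)
  if words_list.length < 2 then labels
  else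
    -- words_list[0]: guarded nonempty by the branch, so headD [] is exact here
    let common_words : PySem.Set String :=
      words_list.tail.foldl (fun s ws => PySem.Set.inter s ws) (PySem.Set.ofList (words_list.headD []))
    let cleaned_labels := labels.map (fun label =>
      PySem.Str.stripChars
        (PySem.Str.join " | "
          ((pvSplit label).filter (fun w => !(PySem.Set.contains common_words w))))
        " | ")
    let cleaned_labels := cleaned_labels.map (fun c => PySem.Str.replace c "|   |" "|")
    let cleaned_labels := cleaned_labels.map (fun c => PySem.Str.replace c "Yes | " "")
    let cleaned_labels := cleaned_labels.map (fun c => PySem.Str.replace c "No | " "")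
    cleaned_labels

-- ===== PORT B =====
def remove_common_items_alt (labels : List String) : List String :=
  let n := labels.length
  let step := labels.foldl
    (fun (acc : PySem.Dict String Int × List (List String)) label =>
      let words := pvSplit label
      let counts := (PySem.List.dedup words).foldl (fun d w => d.insert w (d.getD w 0 + 1)) acc.1
      (counts, acc.2 ++ [words]))
    (PySem.Dict.empty, [])
  let counts := step.1
  let words_list := step.2
  if n < 2 then labels
  else
    words_list.map (fun words =>
      let c := PySem.Str.stripChars
        (PySem.Str.join " | " (words.filter (fun w => decide (counts.getD w 0 < (n : Int))))) " | "
      PySem.Str.replace (PySem.Str.replace (PySem.Str.replace c "|   |" "|") "Yes | " "") "No | " "")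

-- ===== PRECONDITION & SPEC =====
def Spec_remove_common_items (labels : List String) (out : List String) : Prop := out = remove_common_items_alt labels
instance (labels : List String) (out : List String) : Decidable (Spec_remove_common_items labels out) := by unfold Spec_remove_common_items; infer_instance

-- ===== CLAIM (what is proved, stated in full; the proofs are below) =====
def Claim_equal_remove_common_items : Prop := ∀ (labels : List String), Dom_remove_common_items labels → Spec_remove_common_items labels (remove_common_items labels)

-- ===== LEMMAS AND PROOFS =====

-- membership in a folded intersection
theorem mem_foldl_inter (l : List (List String)) (s : PySem.Set String) (y : String) :
    y ∈ l.foldl (fun s ws => PySem.Set.inter s ws) s ↔ y ∈ s ∧ ∀ t ∈ l, y ∈ t := by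
  induction l generalizing s with
  | nil => simp
  | cons t l ih =>
    simp [List.foldl_cons, ih, PySem.Set.mem_inter]
    tauto

-- the count table counts how many word-lists contain w
theorem getD_countsFold (W : List (List String)) (d : PySem.Dict String Int) (w : String) :
    (W.foldl (fun d ws => (PySem.List.dedup ws).foldl (fun d w => d.insert w (d.getD w 0 + 1)) d) d).getD w 0
      = d.getD w 0 + (W.countP (fun ws => decide (w ∈ ws)) : Int) := by
  induction W generalizing d with
  | nil => simp
  | cons ws W ih =>
    rw [List.foldl_cons, ih, PySem.Dict.getD_foldl_insert_add_one, List.countP_cons]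
    by_cases h : w ∈ ws
    · rw [List.count_eq_one_of_mem (PySem.List.nodup_dedup ws) ((PySem.List.mem_dedup ws w).2 h)]
      simp [h]; ring
    · rw [List.count_eq_zero_of_not_mem (fun hc => h ((PySem.List.mem_dedup ws w).1 hc))]
      simp [h]

-- the pair-fold of B splits into the counts fold and the split list
theorem stepFold (labels : List String) (d : PySem.Dict String Int) (ys : List (List String)) :
    labels.foldl
      (fun (acc : PySem.Dict String Int × List (List String)) label =>
        let words := pvSplit label
        let counts := (PySem.List.dedup words).foldl (fun d w => d.insert w (d.getD w 0 + 1)) acc.1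
        (counts, acc.2 ++ [words])) (d, ys)
      = ((labels.map (fun label => pvSplit label)).foldl
           (fun d ws => (PySem.List.dedup ws).foldl (fun d w => d.insert w (d.getD w 0 + 1)) d) d,
         ys ++ labels.map (fun label => pvSplit label)) := by
  induction labels generalizing d ys with
  | nil => simp
  | cons l labels ih =>
    rw [List.foldl_cons, ih]
    simp

-- under the guard, A's not-in-intersection test and B's count-below-n test coincide
theorem pred_eq (labels : List String) (h2 : ¬ labels.length < 2) (w : String) :
    (!(List.foldl (fun s ws => s.inter ws)
        (PySem.Set.ofList ((labels.map (fun label => pvSplit label)).headD []))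
        ((labels.map (fun label => pvSplit label)).tail)).contains w)
    = decide ((List.foldl
          (fun d ws => List.foldl (fun d w => d.insert w (d.getD w 0 + 1)) d (PySem.List.dedup ws))
          PySem.Dict.empty (labels.map (fun label => pvSplit label))).getD w 0
        < (labels.length : Int)) := by
  obtain ⟨l0, rest, rfl⟩ : ∃ l0 rest, labels = l0 :: rest := by
    cases labels with
    | nil => simp at h2
    | cons a b => exact ⟨a, b, rfl⟩
  rw [getD_countsFold]
  have key : (List.foldl (fun s ws => s.inter ws)
      (PySem.Set.ofList (((l0 :: rest).map (fun label => pvSplit label)).headD []))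
      (((l0 :: rest).map (fun label => pvSplit label)).tail)).contains w = true
      ↔ ∀ t ∈ (l0 :: rest).map (fun label => pvSplit label), w ∈ t := by
    rw [PySem.Set.contains_iff, mem_foldl_inter]
    simp [PySem.Set.mem_ofList]
  by_cases hall : ∀ t ∈ (l0 :: rest).map (fun label => pvSplit label), w ∈ t
  · have h1 := key.2 hall
    have h3 : ((l0 :: rest).map (fun label => pvSplit label)).countP (fun ws => decide (w ∈ ws))
        = ((l0 :: rest).map (fun label => pvSplit label)).length := by
      rw [List.countP_eq_length]
      intro a ha
      exact decide_eq_true (hall a ha)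
    rw [h1]
    simp
    simp only [List.map_cons, List.length_cons, List.length_map] at h3
    omega
  · have h1 : (List.foldl (fun s ws => s.inter ws)
        (PySem.Set.ofList (((l0 :: rest).map (fun label => pvSplit label)).headD []))
        (((l0 :: rest).map (fun label => pvSplit label)).tail)).contains w = false := by
      rw [Bool.eq_false_iff]
      exact fun h => hall (key.1 h)
    have h3 : ((l0 :: rest).map (fun label => pvSplit label)).countP (fun ws => decide (w ∈ ws))
        < ((l0 :: rest).map (fun label => pvSplit label)).length := by
      have hle := List.countP_le_length (l := (l0 :: rest).map (fun label => pvSplit label))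
        (p := fun ws => decide (w ∈ ws))
      have hne : ((l0 :: rest).map (fun label => pvSplit label)).countP (fun ws => decide (w ∈ ws))
          ≠ ((l0 :: rest).map (fun label => pvSplit label)).length := by
        intro heq
        exact hall (fun a ha => of_decide_eq_true (List.countP_eq_length.1 heq a ha))
      omega
    rw [h1]
    simp
    simp only [List.map_cons, List.length_cons, List.length_map] at h3
    omega

-- ===== VERDICT (by name: the statement is the Claim_ definition above) =====
theorem remove_common_items_spec : Claim_equal_remove_common_items := by
  intro labels _
  unfold Spec_remove_common_items remove_common_items remove_common_items_alt
  rw [stepFold]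
  simp only [List.length_map, List.nil_append]
  by_cases h2 : labels.length < 2
  · simp [h2]
  · simp only [h2, if_false]
    simp only [List.map_map]
    refine List.map_congr_left ?_
    intro label _
    simp only [Function.comp]
    rw [show (fun w => !(List.foldl (fun s ws => s.inter ws)
        (PySem.Set.ofList ((labels.map (fun label => pvSplit label)).headD []))
        ((labels.map (fun label => pvSplit label)).tail)).contains w)
      = (fun w => decide ((List.foldl
          (fun d ws => List.foldl (fun d w => d.insert w (d.getD w 0 + 1)) d (PySem.List.dedup ws))
          PySem.Dict.empty (labels.map (fun label => pvSplit label))).getD w 0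
        < (labels.length : Int))) from funext (pred_eq labels h2)]
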